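-- pv_equiv track=rewrite | github.com/Price3258/pythonrithm | 1st_week/find_count_to_turn_out_to_all_zero_or_all_one.py | find_count_to_turn_out_to_all_zero_or_all_one
-- ===== SOURCE A (Python) =====
-- def find_count_to_turn_out_to_all_zero_or_all_one(string):
--     count0 = 0  # 0으로 이루어진 그룹 수
--     count1 = 0  # 1으로 이루어진 그룹 수
--
--     # 첫 번째 숫자의 그룹을 초기화
--     if string[0] == '0':
--         count0 += 1
--     else:
--         count1 += 1
--
--     # 연속된 숫자의 그룹 수를 계산
--     for i in range(1, len(string)):
--         if string[i - 1] != string[i]:  # 이전 숫자와 다르면 새로운 그룹 시작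
--             if string[i] == '0':
--                 count0 += 1
--             else:
--                 count1 += 1
--
--     # 결과는 두 그룹 중 더 작은 값을 선택
--     return min(count0, count1)
-- ===== SOURCE B (Python) =====
-- def find_count_to_turn_out_to_all_zero_or_all_one(string):
--     transitions = sum(a != b for a, b in zip(string, string[1:]))
--     zero_runs = len(''.join(c if c == '0' else ' ' for c in string).split())
--     return min(zero_runs, 1 + transitions - zero_runs)
-- ===== Notes on version B (the rewrite author's own statement) =====
-- stated objective: alternative
-- what changed: Replaces A's stateful two-counter run classifier with two independent global quantities -- the adjacent-transition count from a zip pass and the zero-run count obtained by masking non-'0' characters to spaces and splitting on whitespace -- combined by the arithmetic identity other_runs = 1 + transitions - zero_runs.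
import Mathlib
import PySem

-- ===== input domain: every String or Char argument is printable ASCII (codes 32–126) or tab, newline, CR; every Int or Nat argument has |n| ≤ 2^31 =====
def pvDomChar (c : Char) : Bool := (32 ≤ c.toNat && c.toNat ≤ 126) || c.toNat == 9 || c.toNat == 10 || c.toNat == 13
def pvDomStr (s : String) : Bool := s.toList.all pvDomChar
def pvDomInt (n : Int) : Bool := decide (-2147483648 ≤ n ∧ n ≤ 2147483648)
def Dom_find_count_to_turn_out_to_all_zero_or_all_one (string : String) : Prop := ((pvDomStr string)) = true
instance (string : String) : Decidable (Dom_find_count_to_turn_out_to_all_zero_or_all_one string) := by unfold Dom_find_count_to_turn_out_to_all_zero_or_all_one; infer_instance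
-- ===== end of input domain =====

-- ===== PORT A =====
-- B derives the answer arithmetically from a transition count and a mask/split zero-run
-- count instead of A's two-counter branch machine; Pre_ excludes the empty string, where A raises.

-- A's for-loop over range(1, len) comparing string[i-1] with string[i], carried as
-- structural recursion with the previous character as state
def pvLoopA : List Char → Char → Int → Int → Int × Int
  | [], _, c0, c1 => (c0, c1)
  | c :: rest, prev, c0, c1 =>
    if prev ≠ c then
      if c = '0' then pvLoopA rest c (c0 + 1) c1
      else pvLoopA rest c c0 (c1 + 1)
    else pvLoopA rest c c0 c1

def find_count_to_turn_out_to_all_zero_or_all_one (string : String) : Int :=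
  match string.toList with
  | [] => 0   -- string[0] raises IndexError in Python; excluded by Pre_
  | c :: rest =>
    let init : Int × Int := if c = '0' then (1, 0) else (0, 1)
    let r := pvLoopA rest c init.1 init.2
    min r.1 r.2

-- ===== PORT B =====
-- sum(a != b for a, b in zip(string, string[1:]))  — string[1:] is PySem.List.slice l 1 none
-- ''.join(c if c == '0' else ' ' for c in string)  — a map over the characters
-- .split()                                          — PySem.Chars.split₀ (Python str.split())
def find_count_to_turn_out_to_all_zero_or_all_one_alt (string : String) : Int :=
  let l := string.toList
  let transitions : Int :=
    ((l.zip (PySem.List.slice l (some 1) none)).map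
      (fun p => if p.1 ≠ p.2 then (1 : Int) else 0)).sum
  let zero_runs : Int :=
    ((PySem.Chars.split₀ (l.map (fun c => if c = '0' then '0' else ' '))).length : Int)
  min zero_runs (1 + transitions - zero_runs)

-- ===== PRECONDITION & SPEC =====
-- A indexes string[0] unconditionally and raises IndexError on the empty string.
def Pre_find_count_to_turn_out_to_all_zero_or_all_one (string : String) : Prop := string ≠ ""
instance (string : String) : Decidable (Pre_find_count_to_turn_out_to_all_zero_or_all_one string) := by unfold Pre_find_count_to_turn_out_to_all_zero_or_all_one; infer_instance
def pvWitness_find_count_to_turn_out_to_all_zero_or_all_one : String := "0010"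

def Spec_find_count_to_turn_out_to_all_zero_or_all_one (string : String) (out : Int) : Prop := out = find_count_to_turn_out_to_all_zero_or_all_one_alt string
instance (string : String) (out : Int) : Decidable (Spec_find_count_to_turn_out_to_all_zero_or_all_one string out) := by unfold Spec_find_count_to_turn_out_to_all_zero_or_all_one; infer_instance

-- ===== CLAIM (what is proved, stated in full; the proofs are below) =====
def Claim_equal_find_count_to_turn_out_to_all_zero_or_all_one : Prop := ∀ (string : String), Dom_find_count_to_turn_out_to_all_zero_or_all_one string → Pre_find_count_to_turn_out_to_all_zero_or_all_one string → Spec_find_count_to_turn_out_to_all_zero_or_all_one string (find_count_to_turn_out_to_all_zero_or_all_one string)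

-- ===== LEMMAS AND PROOFS =====

-- run heads in the tail, given the previous character
def pvTK : Char → List Char → List Char
  | _, [] => []
  | prev, c :: rest => if prev = c then pvTK c rest else c :: pvTK c rest

lemma pvLoopA_spec : ∀ (rest : List Char) (prev : Char) (c0 c1 : Int),
    pvLoopA rest prev c0 c1 =
      (c0 + ((pvTK prev rest).count '0' : Int),
       c1 + (((pvTK prev rest).length : Int) - ((pvTK prev rest).count '0' : Int))) := by
  intro rest
  induction rest with
  | nil => intro prev c0 c1; simp [pvLoopA, pvTK]
  | cons c rest ih =>
    intro prev c0 c1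
    by_cases h : prev = c
    · simp [pvLoopA, pvTK, h, ih]
    · by_cases hz : c = '0'
      · subst hz
        simp [pvLoopA, pvTK, h, ih, Prod.ext_iff]
        omega
      · simp [pvLoopA, pvTK, h, hz, ih, Prod.ext_iff]
        omega

-- the transition sum equals the number of run heads in the tail
lemma pvTrans_spec : ∀ (rest : List Char) (c : Char),
    (((c :: rest).zip rest).map (fun p => if p.1 ≠ p.2 then (1 : Int) else 0)).sum
      = ((pvTK c rest).length : Int) := by
  intro rest
  induction rest with
  | nil => intro c; simp [pvTK]
  | cons d r ih =>
    intro c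
    have hd := ih d
    by_cases h : c = d
    · subst h
      simp only [List.zip_cons_cons, List.map_cons, List.sum_cons, pvTK]
      rw [hd]
      simp
    · simp only [List.zip_cons_cons, List.map_cons, List.sum_cons, pvTK, if_neg h]
      rw [hd]
      simp [h]
      omega

-- zero-run counter over the raw characters; the flag says "currently inside a zero run"
def pvZR : Bool → List Char → Nat
  | _, [] => 0
  | inw, c :: r => if c = '0' then (if inw then pvZR true r else pvZR true r + 1) else pvZR false r

-- split₀'s accumulator machine on the masked characters counts exactly the zero runs
lemma pvGo_spec : ∀ (l cur : List Char) (acc : List (List Char)),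
    (PySem.Chars.split₀.go (l.map (fun c => if c = '0' then '0' else ' ')) cur acc).length
      = acc.length + (if cur.isEmpty then 0 else 1) + pvZR (!cur.isEmpty) l := by
  intro l
  induction l with
  | nil =>
    intro cur acc
    cases cur <;> simp [PySem.Chars.split₀.go, pvZR]
  | cons c r ih =>
    intro cur acc
    by_cases hz : c = '0'
    · subst hz
      have hns : PySem.Chars.isspace '0' = false := by decide
      cases cur <;> simp [PySem.Chars.split₀.go, hns, ih, pvZR] <;> omega
    · have hsp : PySem.Chars.isspace ' ' = true := by decide
      cases cur <;> simp [PySem.Chars.split₀.go, hsp, hz, ih, pvZR]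

-- the zero-run counter counts the '0' run heads
lemma pvZR_tk : ∀ (rest : List Char) (prev : Char),
    pvZR (prev == '0') rest = (pvTK prev rest).count '0' := by
  intro rest
  induction rest with
  | nil => intro prev; simp [pvZR, pvTK]
  | cons c r ih =>
    intro prev
    have hc := ih c
    by_cases h : prev = c
    · subst h
      by_cases hz : prev = '0'
      · subst hz
        simpa [pvZR, pvTK] using hc
      · have hb : (prev == '0') = false := by simpa using hz
        simp only [pvZR, pvTK, if_neg hz]
        rw [hb] at hc
        exact hc
    · by_cases hz : c = '0'
      · subst hz
        have hp : (prev == '0') = false := by simpa using h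
        simp only [pvZR, pvTK, if_neg h, hp, Bool.false_eq_true, if_false,
          List.count_cons]
        simp only [beq_self_eq_true] at hc
        simp [hc]
      · have hcf : (c == '0') = false := by simpa using hz
        have hcf' : ('0' == c) = false := beq_eq_false_iff_ne.mpr (Ne.symm hz)
        rw [hcf] at hc
        simp [pvZR, pvTK, h, hz, hc, hcf', List.count_cons]

-- ===== VERDICT (by name: the statement is the Claim_ definition above) =====
theorem find_count_to_turn_out_to_all_zero_or_all_one_spec : Claim_equal_find_count_to_turn_out_to_all_zero_or_all_one := by
  intro s _ hpre
  unfold Spec_find_count_to_turn_out_to_all_zero_or_all_one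
  unfold find_count_to_turn_out_to_all_zero_or_all_one find_count_to_turn_out_to_all_zero_or_all_one_alt
  cases hls : s.toList with
  | nil => exact absurd (by simpa [String.toList_eq_nil_iff] using hls) hpre
  | cons c rest =>
    have hzr : (PySem.Chars.split₀ ((c :: rest).map (fun c => if c = '0' then '0' else ' '))).length
        = pvZR false (c :: rest) := by
      simpa using pvGo_spec (c :: rest) [] []
    simp only [PySem.List.slice_from_one, List.tail_cons]
    rw [pvTrans_spec, pvLoopA_spec, hzr]
    have htk := pvZR_tk rest c
    have hcnt : ((pvTK c rest).count '0') ≤ (pvTK c rest).length := List.count_le_length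
    by_cases hz : c = '0'
    · subst hz
      simp only [beq_self_eq_true] at htk
      simp [pvZR, htk]
      omega
    · have hcf : (c == '0') = false := by simpa using hz
      rw [hcf] at htk
      simp [pvZR, hz, htk]
      omega
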